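-- pv_equiv track=rewrite | github.com/zetro47/CaptchaDecoder_PyTorch | app.py | correct_prediction
-- ===== SOURCE A (Python) =====
-- def remove_duplicates(text):
--     if len(text) > 1:
--         letters = [text[0]] + [letter for idx, letter in enumerate(text[1:], start=1) if text[idx] != text[idx-1]]
--     elif len(text) == 1:
--         letters = [text[0]]
--     else:
--         return ""
--     return "".join(letters)
--
-- def correct_prediction(word):
--     parts = word.split("-")
--     parts = [remove_duplicates(part) for part in parts]
--     corrected_word = "".join(parts)
--
--     if(len(corrected_word) == 5):
--         freqs = {}
--         for element in set(word):
--             freqs.update({element: {'val': 0, 'index': None}})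
--         prev_element = None
--         i = 0
--         for element in word:
--             if(prev_element == element and not(element=='-') ):
--                 freqs[element]['val'] += 1
--                 freqs[element]['index'] = i
--             prev_element = element
--             i = i + 1
--         max_freq = 0
--         max_element = None
--         for element in freqs:
--             if(freqs[element]['val'] > max_freq):
--                 max_freq = freqs[element]['val']
--                 max_element = element
--         index = freqs[max_element]['index']
--         word = word[0:index] + "-" + word[index:]
--         return(correct_prediction(word))
--
--     return corrected_word
-- ===== SOURCE B (Python) =====
-- def correct_prediction(word):
--     # Iterative re-implementation: the tail recursion becomes a loop; one fused
--     # pass computes the collapsed word (instead of split('-') + per-part dedup +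
--     # join); a single pair-scan dict over zip(word, word[1:]) replaces the
--     # set-initialised freqs table, holding (count, last_index) only for letters
--     # that actually repeat; an explicit max scan picks the winner.
--     while True:
--         collapsed = []
--         prev = None
--         for c in word:
--             if c != '-' and c != prev:
--                 collapsed.append(c)
--             prev = c
--         if len(collapsed) != 5:
--             return "".join(collapsed)
--         counts = {}
--         for i, (p, c) in enumerate(zip(word, word[1:]), start=1):
--             if c != '-' and p == c:
--                 n, _ = counts.get(c, (0, 0))
--                 counts[c] = (n + 1, i)
--         best = None
--         best_n, best_i = 0, 0
--         for c, (n, i) in counts.items():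
--             if n > best_n:
--                 best, best_n, best_i = c, n, i
--         if best is None:
--             # no adjacent repeated letter to split on (A raises KeyError here)
--             return "".join(collapsed)
--         word = word[:best_i] + "-" + word[best_i:]
-- ===== Notes on version B (the rewrite author's own statement) =====
-- stated objective: alternative
-- what changed: Replaces the tail recursion with a while-loop, fuses split('-')+per-part dedup+join into one collapsing pass, and replaces the set(word)-initialised freqs table of {'val','index'} dicts by a single (count,last_index) dict built from zip(word, word[1:]), with an explicit max scan.
-- outside the precondition, e.g. on correct_prediction('aabbcde'): A returns 'abbcde', B returns 'aabcde'
-- crash fix: When the collapsed word has length 5 but no letter is adjacently repeated, A raises KeyError (freqs[None]); B returns the collapsed word unchanged. — e.g. on correct_prediction("abcde"): A raises KeyError, B returns "abcde"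
import Mathlib
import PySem

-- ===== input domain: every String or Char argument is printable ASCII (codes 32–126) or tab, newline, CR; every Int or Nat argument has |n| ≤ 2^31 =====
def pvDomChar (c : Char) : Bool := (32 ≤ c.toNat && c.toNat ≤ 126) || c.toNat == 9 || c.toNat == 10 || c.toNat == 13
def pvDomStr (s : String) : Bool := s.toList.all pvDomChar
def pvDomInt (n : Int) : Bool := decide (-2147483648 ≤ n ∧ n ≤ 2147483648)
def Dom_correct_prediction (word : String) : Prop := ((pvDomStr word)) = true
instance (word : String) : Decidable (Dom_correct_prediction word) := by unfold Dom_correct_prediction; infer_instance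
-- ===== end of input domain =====

-- B replaces A's tail recursion by a loop, fuses split('-')+dedup+join into one
-- collapsing pass, and builds one (count,last_index) dict from adjacent pairs
-- instead of A's set-initialised freqs table (objective: alternative).

-- ===== PORT A =====

-- remove_duplicates: [text[0]] + [letter for idx, letter in enumerate(text[1:], 1) if text[idx] != text[idx-1]];
-- the comprehension pairs text[1:] with its predecessors, i.e. zip (text.drop 1) text.
def pvRdA (text : List Char) : List Char :=
  if 1 < text.length then
    text.take 1 ++ (((text.drop 1).zip text).filter (fun q => decide (q.1 ≠ q.2))).map Prod.fst
  else if text.length = 1 then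
    text.take 1
  else []

-- the freqs loop body; state = (freqs, prev_element, i); the inner {'val','index'} dict is the pair (Int × Option Int)
def pvStepA (st : PySem.Dict Char (Int × Option Int) × Option Char × Int) (c : Char) :
    PySem.Dict Char (Int × Option Int) × Option Char × Int :=
  (if st.2.1 = some c ∧ c ≠ '-' then
     st.1.modify c ((0 : Int), (none : Option Int)) (fun p => (p.1 + 1, some st.2.2))
   else st.1,
   some c, st.2.2 + 1)

-- correct_prediction, with fuel making the self-call structural (a guard for totality only)
def pvGoA : Nat → List Char → List Char
  | 0, _ => []
  | fuel + 1, w =>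
    let corrected := PySem.Chars.join [] ((PySem.Chars.splitOn w ['-']).map pvRdA)
    if corrected.length = 5 then
      let freqs0 : PySem.Dict Char (Int × Option Int) :=
        (PySem.Set.ofList w).foldl (fun d c => d.insert c ((0 : Int), (none : Option Int))) PySem.Dict.empty
      let freqs := (w.foldl pvStepA (freqs0, none, 0)).1
      let m := freqs.keys.foldl
        (fun (acc : Int × Option Char) c =>
          if (freqs.getD c (0, none)).1 > acc.1 then ((freqs.getD c (0, none)).1, some c) else acc)
        (0, none)
      match m.2 with
      | none => corrected        -- Python raises KeyError (freqs[None]) here; excluded by Pre_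
      | some c =>
        match (freqs.getD c (0, none)).2 with
        | none => corrected      -- unreachable: the chosen key has val > 0, so its index was set
        | some i =>
          pvGoA fuel (PySem.List.slice w (some 0) (some i) ++ '-' :: PySem.List.slice w (some i) none)
    else corrected

def correct_prediction (word : String) : String :=
  String.ofList (pvGoA (word.toList.length + 1) word.toList)

-- ===== PORT B =====

-- transliteration of Source B; "".join of a list of chars is the char list itself;
-- fuel only makes the `while True` structural (the loop returns on its 2nd pass at the latest)
def pvGoB : Nat → List Char → List Char
  | 0, _ => []
  | fuel + 1, w =>
    let collapsed := (w.foldl (fun (st : List Char × Option Char) c =>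
        (if c ≠ '-' ∧ st.2 ≠ some c then st.1 ++ [c] else st.1, some c)) ([], none)).1
    if collapsed.length ≠ 5 then collapsed
    else
      let counts : PySem.Dict Char (Int × Int) :=
        (PySem.List.enumerate (w.zip (PySem.List.slice w (some 1) none)) 1).foldl
          (fun d q => if q.2.2 ≠ '-' ∧ q.2.1 = q.2.2
                      then d.insert q.2.2 ((d.getD q.2.2 (0, 0)).1 + 1, q.1) else d)
          PySem.Dict.empty
      let br := counts.items.foldl
        (fun (acc : Option Char × Int × Int) q => if q.2.1 > acc.2.1 then (some q.1, q.2) else acc)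
        (none, 0, 0)
      match br.1 with
      | none => collapsed
      | some _ =>
        pvGoB fuel (PySem.List.slice w (some 0) (some br.2.2) ++ '-' :: PySem.List.slice w (some br.2.2) none)

def correct_prediction_alt (word : String) : String :=
  String.ofList (pvGoB (word.toList.length + 1) word.toList)

-- ===== PRECONDITION & SPEC =====

-- the collapsed word: drop dashes, collapse adjacent equal letters (prev = previous raw char)
def pvCol : Option Char → List Char → List Char
  | _, [] => []
  | prev, c :: t =>
    if c = '-' then pvCol (some '-') t
    else if prev = some c then pvCol (some c) t
    else c :: pvCol (some c) t

-- the adjacent repeated non-dash positions of a word: (character, index of the 2nd of the pair)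
def pvPairs : Option Char → Int → List Char → List (Char × Int)
  | _, _, [] => []
  | prev, i, c :: t => (if prev = some c ∧ c ≠ '-' then [(c, i)] else []) ++ pvPairs (some c) (i + 1) t

def pvRep (d : Char) (w : List Char) : Nat :=
  ((pvPairs none 0 w).filter (fun q => decide (q.1 = d))).length

-- Pre_ excludes words whose 5-letter collapse has no adjacently repeated letter (A raises
-- KeyError there) or has its greatest repeat count tied between two letters (there A's answer
-- depends on Python's hash-randomised set iteration order, which is anybody's corner).
def Pre_correct_prediction (word : String) : Prop :=
  (pvCol none word.toList).length = 5 →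
  ∃ c ∈ word.toList, 0 < pvRep c word.toList ∧
    ∀ d ∈ word.toList, d ≠ c → pvRep d word.toList < pvRep c word.toList

instance (word : String) : Decidable (Pre_correct_prediction word) := by
  unfold Pre_correct_prediction; infer_instance

def pvWitness_correct_prediction : String := "ab"

-- When the collapsed word has length 5 but no letter is adjacently repeated, A raises
-- KeyError (freqs[None]); B returns the collapsed word unchanged.
def Raises_correct_prediction (word : String) : Prop :=
  (pvCol none word.toList).length = 5 ∧ pvPairs none 0 word.toList = []

instance (word : String) : Decidable (Raises_correct_prediction word) := by
  unfold Raises_correct_prediction; infer_instance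

def pvRaiseWitness_correct_prediction : String := "abcde"
def pvRaiseWitnessOut_correct_prediction : String := "abcde"

def Spec_correct_prediction (word : String) (out : String) : Prop := out = correct_prediction_alt word
instance (word : String) (out : String) : Decidable (Spec_correct_prediction word out) := by
  unfold Spec_correct_prediction; infer_instance

-- ===== CLAIM (what is proved, stated in full; the proofs are below) =====
def Claim_equal_correct_prediction : Prop := ∀ (word : String), Dom_correct_prediction word → Pre_correct_prediction word → Spec_correct_prediction word (correct_prediction word)

def Claim_raises_correct_prediction : Prop := (∀ (word : String), Dom_correct_prediction word → Raises_correct_prediction word → ¬ Pre_correct_prediction word) ∧ (Dom_correct_prediction (pvRaiseWitness_correct_prediction) ∧ Raises_correct_prediction (pvRaiseWitness_correct_prediction) ∧ correct_prediction_alt (pvRaiseWitness_correct_prediction) = pvRaiseWitnessOut_correct_prediction)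

-- ===== LEMMAS AND PROOFS =====

lemma pvCol_dash (t : List Char) : pvCol (some '-') t = pvCol none t := by
  cases t with
  | nil => rfl
  | cons c t =>
    by_cases hc : c = '-'
    · simp [pvCol, hc]
    · have h1 : ¬ (some '-' = some c) := by simp [Ne.symm hc]
      have h2 : ¬ ((none : Option Char) = some c) := by simp
      simp [pvCol, hc, h1, h2]

lemma pvCol_append_dash (p : List Char) : ∀ (prev : Option Char) (r : List Char),
    pvCol prev (p ++ '-' :: r) = pvCol prev p ++ pvCol none r := by
  induction p with
  | nil => intro prev r; simp [pvCol, pvCol_dash]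
  | cons c t ih =>
    intro prev r
    by_cases hc : c = '-'
    · subst hc; simp [pvCol, ih]
    · by_cases hp : prev = some c
      · simp [pvCol, hc, hp, ih]
      · simp [pvCol, hc, hp, ih]

lemma rd_zip (t : List Char) : ∀ (prev : Char), prev ≠ '-' → '-' ∉ t →
    ((t.zip (prev :: t)).filter (fun q => decide (q.1 ≠ q.2))).map Prod.fst = pvCol (some prev) t := by
  induction t with
  | nil => intro prev _ _; simp [pvCol]
  | cons c t ih =>
    intro prev hprev hmem
    have hc : c ≠ '-' := by intro h; exact hmem (by simp [h])
    have hmem' : '-' ∉ t := fun h => hmem (List.mem_cons_of_mem _ h)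
    have hih := ih c hc hmem'
    by_cases h : c = prev
    · subst h
      have hf : ((c :: t).zip (c :: c :: t)).filter (fun q => decide (q.1 ≠ q.2))
          = (t.zip (c :: t)).filter (fun q => decide (q.1 ≠ q.2)) := by
        rw [List.zip_cons_cons, List.filter_cons]; simp
      rw [hf, hih]
      simp [pvCol, hc]
    · have hf : ((c :: t).zip (prev :: c :: t)).filter (fun q => decide (q.1 ≠ q.2))
          = (c, prev) :: (t.zip (c :: t)).filter (fun q => decide (q.1 ≠ q.2)) := by
        rw [List.zip_cons_cons, List.filter_cons]; simp [h]
      rw [hf, List.map_cons, hih]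
      have hps : ¬ (some prev = some c) := by
        intro hh; exact h (Option.some_inj.mp hh).symm
      simp [pvCol, hc, hps]

lemma rd_eq : ∀ (p : List Char), '-' ∉ p → pvRdA p = pvCol none p := by
  intro p hp
  match p with
  | [] => rfl
  | [a] =>
    have ha : a ≠ '-' := by intro h; exact hp (by simp [h])
    simp [pvRdA, pvCol, ha]
  | a :: b :: t =>
    have ha : a ≠ '-' := by intro h; exact hp (by simp [h])
    have hbt : '-' ∉ b :: t := fun h => hp (List.mem_cons_of_mem _ h)
    have hlen : 1 < (a :: b :: t).length := by simp
    have hz := rd_zip (b :: t) a ha hbt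
    have hns : ¬ ((none : Option Char) = some a) := by simp
    simp only [pvRdA, if_pos hlen, List.take, List.drop]
    rw [hz]
    simp [pvCol, ha, hns]

lemma splitOn_go_eq (fuel : Nat) : ∀ (l cur : List Char) (acc : List (List Char)), l.length < fuel →
    PySem.Chars.splitOn.go ['-'] fuel l cur acc
      = acc.reverse ++ List.modifyHead (fun x => cur.reverse ++ x) (l.splitOn '-') := by
  induction fuel with
  | zero => intro l cur acc h; omega
  | succ fuel ih =>
    intro l cur acc hl
    cases l with
    | nil =>
      show ((cur.reverse :: acc).reverse)
          = acc.reverse ++ List.modifyHead (fun x => cur.reverse ++ x) ([].splitOn '-')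
      simp [List.splitOn]
    | cons c rest =>
      by_cases hc : c = '-'
      · have hpre : List.isPrefixOf ['-'] (c :: rest) = true := by
          simp [List.isPrefixOf, hc]
        show (if List.isPrefixOf ['-'] (c :: rest) = true then
                PySem.Chars.splitOn.go ['-'] fuel (List.drop (['-'] : List Char).length (c :: rest)) [] (cur.reverse :: acc)
              else PySem.Chars.splitOn.go ['-'] fuel rest (c :: cur) acc)
            = acc.reverse ++ List.modifyHead (fun x => cur.reverse ++ x) ((c :: rest).splitOn '-')
        rw [if_pos hpre]
        have hdrop : List.drop (['-'] : List Char).length (c :: rest) = rest := by simp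
        rw [hdrop, ih rest [] (cur.reverse :: acc) (by simp at hl ⊢; omega)]
        have hsplit : (c :: rest).splitOn '-' = [] :: rest.splitOn '-' := by
          simp [List.splitOn, List.splitOnP_cons, hc]
        rw [hsplit]
        simp [List.modifyHead]
        cases h : rest.splitOn '-' with
        | nil => exact absurd h (List.splitOnP_ne_nil _ _)
        | cons q qs => simp [List.modifyHead]
      · have hpre : List.isPrefixOf ['-'] (c :: rest) = false := by
          simp [List.isPrefixOf, hc]; intro h; exact hc h.symm
        show (if List.isPrefixOf ['-'] (c :: rest) = true then
                PySem.Chars.splitOn.go ['-'] fuel (List.drop (['-'] : List Char).length (c :: rest)) [] (cur.reverse :: acc)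
              else PySem.Chars.splitOn.go ['-'] fuel rest (c :: cur) acc)
            = acc.reverse ++ List.modifyHead (fun x => cur.reverse ++ x) ((c :: rest).splitOn '-')
        rw [if_neg (by simp [hpre])]
        rw [ih rest (c :: cur) acc (by simp at hl ⊢; omega)]
        have hsplit : (c :: rest).splitOn '-' = List.modifyHead (List.cons c) (rest.splitOn '-') := by
          simp [List.splitOn, List.splitOnP_cons, hc]
        rw [hsplit, List.modifyHead_modifyHead]
        congr 1
        apply congrFun
        apply congrArg
        funext x
        simp

lemma chars_splitOn_eq (s : List Char) : PySem.Chars.splitOn s ['-'] = s.splitOn '-' := by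
  show PySem.Chars.splitOn.go ['-'] (s.length + 1) s [] [] = s.splitOn '-'
  rw [splitOn_go_eq (s.length + 1) s [] [] (by omega)]
  cases h : s.splitOn '-' with
  | nil => exact absurd h (List.splitOnP_ne_nil _ _)
  | cons q qs => simp [List.modifyHead]

lemma splitOn_no_dash (w : List Char) : ∀ l ∈ w.splitOn '-', '-' ∉ l := by
  induction w with
  | nil =>
    intro l hl
    simp [List.splitOn] at hl
    simp [hl]
  | cons c t ih =>
    intro l hl
    by_cases hc : c = '-'
    · rw [show (c :: t).splitOn '-' = [] :: t.splitOn '-' by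
        simp [List.splitOn, List.splitOnP_cons, hc]] at hl
      rcases List.mem_cons.mp hl with h | h
      · simp [h]
      · exact ih l h
    · rw [show (c :: t).splitOn '-' = List.modifyHead (List.cons c) (t.splitOn '-') by
        simp [List.splitOn, List.splitOnP_cons, hc]] at hl
      cases h : t.splitOn '-' with
      | nil => exact absurd h (List.splitOnP_ne_nil _ _)
      | cons q qs =>
        rw [h] at hl
        simp [List.modifyHead] at hl
        rcases hl with h' | h'
        · subst h'
          intro hm
          rcases List.mem_cons.mp hm with h'' | h''
          · exact hc h''.symm
          · exact ih q (h ▸ List.mem_cons_self) h''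
        · exact ih l (h ▸ List.mem_cons_of_mem _ h')

lemma joinmap : ∀ (parts : List (List Char)), parts ≠ [] → (∀ l ∈ parts, '-' ∉ l) →
    PySem.Chars.join [] (parts.map pvRdA) = pvCol none (['-'].intercalate parts) := by
  intro parts
  induction parts with
  | nil => intro h; exact absurd rfl h
  | cons p ps ih =>
    intro _ hnd
    cases ps with
    | nil =>
      simp only [List.map, PySem.Chars.join_singleton]
      rw [rd_eq p (hnd p (by simp))]
      simp [List.intercalate]
    | cons q qs =>
      simp only [List.map, PySem.Chars.join_cons_cons]
      rw [rd_eq p (hnd p (by simp))]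
      have hint : (['-'] : List Char).intercalate (p :: q :: qs) = p ++ '-' :: (['-'] : List Char).intercalate (q :: qs) := by
        simp [List.intercalate, List.intersperse]
      rw [hint, pvCol_append_dash]
      rw [show pvRdA q :: List.map pvRdA qs = List.map pvRdA (q :: qs) from rfl,
          ih (by simp) (fun l hl => hnd l (List.mem_cons_of_mem _ hl))]
      simp

lemma colA_eq (w : List Char) :
    PySem.Chars.join [] ((PySem.Chars.splitOn w ['-']).map pvRdA) = pvCol none w := by
  rw [chars_splitOn_eq]
  conv_rhs => rw [← List.intercalate_splitOn w '-']
  exact joinmap _ (List.splitOnP_ne_nil _ _) (splitOn_no_dash w)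

lemma colB_eq (l : List Char) : ∀ (acc : List Char) (prev : Option Char),
    (l.foldl (fun (st : List Char × Option Char) c =>
      (if c ≠ '-' ∧ st.2 ≠ some c then st.1 ++ [c] else st.1, some c)) (acc, prev)).1
    = acc ++ pvCol prev l := by
  induction l with
  | nil => intro acc prev; simp [pvCol]
  | cons c t ih =>
    intro acc prev
    by_cases hc : c = '-'
    · subst hc; simp only [List.foldl_cons]
      rw [show (if ('-' : Char) ≠ '-' ∧ prev ≠ some '-' then acc ++ ['-'] else acc) = acc by simp]
      rw [ih acc (some '-')]
      simp [pvCol, pvCol_dash]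
    · by_cases hp : prev = some c
      · simp only [List.foldl_cons]
        rw [show (if c ≠ '-' ∧ prev ≠ some c then acc ++ [c] else acc) = acc by simp [hp]]
        rw [ih acc (some c)]
        simp [pvCol, hc, hp]
      · simp only [List.foldl_cons]
        rw [show (if c ≠ '-' ∧ prev ≠ some c then acc ++ [c] else acc) = acc ++ [c] by simp [hc, hp]]
        rw [ih (acc ++ [c]) (some c)]
        simp [pvCol, hc, hp]

lemma freq0_getD : ∀ (s : List Char) (dct : PySem.Dict Char (Int × Option Int)),
    (∀ x, dct.getD x ((0 : Int), (none : Option Int)) = (0, none)) →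
    ∀ d, (s.foldl (fun d c => d.insert c ((0 : Int), (none : Option Int))) dct).getD d (0, none) = (0, none) := by
  intro s
  induction s with
  | nil => intro dct h d; exact h d
  | cons c t ih =>
    intro dct h d
    simp only [List.foldl_cons]
    refine ih _ (fun x => ?_) d
    rw [PySem.Dict.getD_insert]
    split_ifs with hx
    · rfl
    · exact h x

lemma freqA_getD (l : List Char) : ∀ (f : PySem.Dict Char (Int × Option Int)) (prev : Option Char) (i : Int) (d : Char),
    ((l.foldl pvStepA (f, prev, i)).1).getD d (0, none)
      = ((f.getD d (0, none)).1 + (((pvPairs prev i l).filter (fun q => decide (q.1 = d))).length : Int),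
         ((pvPairs prev i l).filter (fun q => decide (q.1 = d))).foldl (fun _ q => some q.2) ((f.getD d (0, none)).2)) := by
  induction l with
  | nil => intro f prev i d; simp [pvPairs]
  | cons c t ih =>
    intro f prev i d
    simp only [List.foldl_cons]
    by_cases hcond : prev = some c ∧ c ≠ '-'
    · have hstep : pvStepA (f, prev, i) c
          = (f.modify c ((0 : Int), (none : Option Int)) (fun p => (p.1 + 1, some i)), some c, i + 1) := by
        simp [pvStepA, hcond]
      rw [hstep, ih]
      have hpairs : pvPairs prev i (c :: t) = (c, i) :: pvPairs (some c) (i + 1) t := by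
        simp [pvPairs, hcond]
      rw [hpairs]
      by_cases hd : c = d
      · subst hd
        have h1 : (f.modify c ((0 : Int), (none : Option Int)) (fun p => (p.1 + 1, some i))).getD c (0, none)
            = ((f.getD c (0, none)).1 + 1, some i) := by
          rw [PySem.Dict.getD_modify]; simp
        rw [h1]
        rw [show ((c, i) :: pvPairs (some c) (i + 1) t).filter (fun q => decide (q.1 = c))
            = (c, i) :: (pvPairs (some c) (i + 1) t).filter (fun q => decide (q.1 = c)) by
          rw [List.filter_cons]; simp]
        simp only [List.length_cons, List.foldl_cons, Prod.mk.injEq]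
        exact ⟨by push_cast; ring, by trivial⟩
      · have h1 : (f.modify c ((0 : Int), (none : Option Int)) (fun p => (p.1 + 1, some i))).getD d (0, none)
            = f.getD d (0, none) := by
          rw [PySem.Dict.getD_modify, if_neg (show ¬ d = c from fun h => hd h.symm)]
        rw [h1]
        rw [show ((c, i) :: pvPairs (some c) (i + 1) t).filter (fun q => decide (q.1 = d))
            = (pvPairs (some c) (i + 1) t).filter (fun q => decide (q.1 = d)) by
          rw [List.filter_cons]; simp [hd]]
    · have hstep : pvStepA (f, prev, i) c = (f, some c, i + 1) := by
        simp [pvStepA, hcond]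
      rw [hstep, ih]
      have hpairs : pvPairs prev i (c :: t) = pvPairs (some c) (i + 1) t := by
        simp [pvPairs, hcond]
      rw [hpairs]

lemma keys_preserved (l : List Char) : ∀ (f : PySem.Dict Char (Int × Option Int)) (prev : Option Char) (i : Int),
    (∀ c ∈ l, c ∈ f.keys) → ((l.foldl pvStepA (f, prev, i)).1).keys = f.keys := by
  induction l with
  | nil => intro f prev i _; rfl
  | cons c t ih =>
    intro f prev i h
    simp only [List.foldl_cons]
    by_cases hcond : prev = some c ∧ c ≠ '-'
    · have hstep : pvStepA (f, prev, i) c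
          = (f.modify c ((0 : Int), (none : Option Int)) (fun p => (p.1 + 1, some i)), some c, i + 1) := by
        simp [pvStepA, hcond]
      rw [hstep]
      have hkeys : (f.modify c ((0 : Int), (none : Option Int)) (fun p => (p.1 + 1, some i))).keys = f.keys := by
        rw [PySem.Dict.keys_modify]
        exact PySem.Dict.keys_insert_of_contains f _
          ((PySem.Dict.contains_iff_mem_keys f c).mpr (h c (by simp)))
      rw [ih _ (some c) (i + 1) (fun x hx => by rw [hkeys]; exact h x (List.mem_cons_of_mem _ hx))]
      exact hkeys
    · have hstep : pvStepA (f, prev, i) c = (f, some c, i + 1) := by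
        simp [pvStepA, hcond]
      rw [hstep]
      exact ih _ (some c) (i + 1) (fun x hx => h x (List.mem_cons_of_mem _ hx))

lemma maxScanStay (v : Char → Int) : ∀ (ks : List Char) (a : Int × Option Char),
    (∀ d ∈ ks, ¬ v d > a.1) →
    ks.foldl (fun acc d => if v d > acc.1 then (v d, some d) else acc) a = a := by
  intro ks
  induction ks with
  | nil => intro a _; rfl
  | cons k ks ih =>
    intro a h
    simp only [List.foldl_cons]
    rw [if_neg (h k (by simp))]
    exact ih a (fun d hd => h d (List.mem_cons_of_mem _ hd))

lemma maxScan (v : Char → Int) : ∀ (ks : List Char) (c : Char) (a : Int × Option Char),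
    ks.Nodup → c ∈ ks → a.1 < v c → (∀ d ∈ ks, d ≠ c → v d < v c) →
    ks.foldl (fun acc d => if v d > acc.1 then (v d, some d) else acc) a = (v c, some c) := by
  intro ks
  induction ks with
  | nil => intro c a _ hc; exact absurd hc (by simp)
  | cons k ks ih =>
    intro c a hnd hc ha hmax
    simp only [List.foldl_cons]
    by_cases hk : k = c
    · subst hk
      rw [if_pos (by simpa using ha)]
      apply maxScanStay
      intro d hd
      have hdk : d ≠ k := by
        intro h; subst h; exact (List.nodup_cons.mp hnd).1 hd
      have := hmax d (List.mem_cons_of_mem _ hd) hdk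
      simp; omega
    · have hc' : c ∈ ks := by
        rcases List.mem_cons.mp hc with h | h
        · exact absurd h.symm hk
        · exact h
      have hkc : v k < v c := hmax k (by simp) hk
      by_cases hh : v k > a.1
      · rw [if_pos hh]
        exact ih c (v k, some k) (List.nodup_cons.mp hnd).2 hc' hkc
          (fun d hd hdc => hmax d (List.mem_cons_of_mem _ hd) hdc)
      · rw [if_neg hh]
        exact ih c a (List.nodup_cons.mp hnd).2 hc' ha
          (fun d hd hdc => hmax d (List.mem_cons_of_mem _ hd) hdc)

lemma maxScanStayB (v : Char → Int × Int) : ∀ (ks : List Char) (a : Option Char × Int × Int),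
    (∀ d ∈ ks, ¬ (v d).1 > a.2.1) →
    ks.foldl (fun acc d => if (v d).1 > acc.2.1 then (some d, v d) else acc) a = a := by
  intro ks
  induction ks with
  | nil => intro a _; rfl
  | cons k ks ih =>
    intro a h
    simp only [List.foldl_cons]
    rw [if_neg (h k (by simp))]
    exact ih a (fun d hd => h d (List.mem_cons_of_mem _ hd))

lemma maxScanB (v : Char → Int × Int) : ∀ (ks : List Char) (c : Char) (a : Option Char × Int × Int),
    ks.Nodup → c ∈ ks → a.2.1 < (v c).1 → (∀ d ∈ ks, d ≠ c → (v d).1 < (v c).1) →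
    ks.foldl (fun acc d => if (v d).1 > acc.2.1 then (some d, v d) else acc) a = (some c, v c) := by
  intro ks
  induction ks with
  | nil => intro c a _ hc; exact absurd hc (by simp)
  | cons k ks ih =>
    intro c a hnd hc ha hmax
    simp only [List.foldl_cons]
    by_cases hk : k = c
    · subst hk
      rw [if_pos (by simpa using ha)]
      apply maxScanStayB
      intro d hd
      have hdk : d ≠ k := by
        intro h; subst h; exact (List.nodup_cons.mp hnd).1 hd
      have := hmax d (List.mem_cons_of_mem _ hd) hdk
      simp; omega
    · have hc' : c ∈ ks := by
        rcases List.mem_cons.mp hc with h | h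
        · exact absurd h.symm hk
        · exact h
      have hkc : (v k).1 < (v c).1 := hmax k (by simp) hk
      by_cases hh : (v k).1 > a.2.1
      · rw [if_pos hh]
        exact ih c (some k, v k) (List.nodup_cons.mp hnd).2 hc' hkc
          (fun d hd hdc => hmax d (List.mem_cons_of_mem _ hd) hdc)
      · rw [if_neg hh]
        exact ih c a (List.nodup_cons.mp hnd).2 hc' ha
          (fun d hd hdc => hmax d (List.mem_cons_of_mem _ hd) hdc)

lemma foldLastPair : ∀ (l : List (Char × Int)), l ≠ [] → ∀ (i1 : Option Int) (i2 : Int),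
    ∃ q, q ∈ l ∧ l.foldl (fun _ q => some q.2) i1 = some q.2
      ∧ l.foldl (fun (_ : Int) q => q.2) i2 = q.2 := by
  intro l
  induction l with
  | nil => intro h; exact absurd rfl h
  | cons q t ih =>
    intro _ i1 i2
    cases t with
    | nil => exact ⟨q, by simp⟩
    | cons r s =>
      obtain ⟨q', hq', h1, h2⟩ := ih (by simp) (some q.2) q.2
      exact ⟨q', List.mem_cons_of_mem _ hq', by simpa using h1, by simpa using h2⟩

lemma pairs_mem (l : List Char) : ∀ (prev : Option Char) (i : Int) (c : Char) (j : Int),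
    (c, j) ∈ pvPairs prev i l →
    c ≠ '-' ∧ ((prev = some c ∧ j = i ∧ ∃ v, l = c :: v)
      ∨ ∃ u v, l = u ++ c :: c :: v ∧ j = i + u.length + 1) := by
  induction l with
  | nil => intro prev i c j h; simp [pvPairs] at h
  | cons e t ih =>
    intro prev i c j h
    simp only [pvPairs, List.mem_append] at h
    rcases h with h | h
    · by_cases hcond : prev = some e ∧ e ≠ '-'
      · rw [if_pos hcond] at h
        simp at h
        obtain ⟨hce, hji⟩ := h
        subst hce; subst hji
        exact ⟨hcond.2, Or.inl ⟨hcond.1, rfl, t, rfl⟩⟩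
      · rw [if_neg hcond] at h; simp at h
    · obtain ⟨hc, hcase⟩ := ih (some e) (i + 1) c j h
      refine ⟨hc, Or.inr ?_⟩
      rcases hcase with ⟨hec, hji, v, hts⟩ | ⟨u, v, hts, hj⟩
      · refine ⟨[], v, ?_, ?_⟩
        · simp [hts, Option.some_inj.mp hec]
        · simp [hji]
      · exact ⟨e :: u, v, by simp [hts], by simp [hj]; ring⟩

lemma pairs_decomp (w : List Char) (c : Char) (j : Int) (h : (c, j) ∈ pvPairs none 0 w) :
    c ≠ '-' ∧ ∃ u v, w = u ++ c :: c :: v ∧ j = (u.length : Int) + 1 := by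
  obtain ⟨hc, hcase⟩ := pairs_mem w none 0 c j h
  rcases hcase with ⟨he, _⟩ | ⟨u, v, hw, hj⟩
  · simp at he
  · exact ⟨hc, u, v, hw, by omega⟩

lemma pairs_fst_mem (w : List Char) (c : Char) (j : Int) (h : (c, j) ∈ pvPairs none 0 w) :
    c ∈ w := by
  obtain ⟨-, u, v, hw, -⟩ := pairs_decomp w c j h
  simp [hw]

lemma insert_len (c : Char) (hc : c ≠ '-') : ∀ (u v : List Char) (prev : Option Char),
    (pvCol prev (u ++ c :: '-' :: c :: v)).length = (pvCol prev (u ++ c :: c :: v)).length + 1 := by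
  intro u
  induction u with
  | nil =>
    intro v prev
    have hcs : ¬ ('-' = c) := fun h => hc h.symm
    by_cases hp : prev = some c
    · simp [pvCol, hc, hp, hcs, pvCol_dash]
    · simp [pvCol, hc, hp, hcs, pvCol_dash]
  | cons e u ih =>
    intro v prev
    by_cases he : e = '-'
    · subst he; simp only [List.cons_append, pvCol, if_pos rfl]; exact ih v (some '-')
    · by_cases hp : prev = some e
      · simp only [List.cons_append, pvCol, if_neg he, if_pos hp]; exact ih v (some e)
      · simp only [List.cons_append, pvCol, if_neg he, if_neg hp, List.length_cons]
        rw [ih v (some e)]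

lemma enumzip_eq (t : List Char) : ∀ (p : Char) (i : Int),
    ((PySem.List.enumerate ((p :: t).zip t) (i + 1)).filter
        (fun q => decide (q.2.2 ≠ '-' ∧ q.2.1 = q.2.2))).map (fun q => (q.2.2, q.1))
      = pvPairs (some p) (i + 1) t := by
  induction t with
  | nil => intro p i; simp [pvPairs, PySem.List.enumerate]
  | cons c t' ih =>
    intro p i
    simp only [List.zip_cons_cons, PySem.List.enumerate_cons, List.filter_cons]
    by_cases hcond : c ≠ '-' ∧ p = c
    · have hpairs : pvPairs (some p) (i + 1) (c :: t')
          = (c, i + 1) :: pvPairs (some c) (i + 1 + 1) t' := by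
        simp [pvPairs, hcond.2, hcond.1]
      rw [hpairs]
      rw [if_pos (by simpa using hcond)]
      simp only [List.map_cons]
      rw [ih c (i + 1)]
    · have hpairs : pvPairs (some p) (i + 1) (c :: t')
          = pvPairs (some c) (i + 1 + 1) t' := by
        have hno : ¬ (some p = some c ∧ c ≠ '-') := by
          intro ⟨h1, h2⟩; exact hcond ⟨h2, Option.some_inj.mp h1⟩
        rw [show pvPairs (some p) (i + 1) (c :: t')
            = (if some p = some c ∧ c ≠ '-' then [(c, i + 1)] else []) ++ pvPairs (some c) (i + 1 + 1) t' from rfl,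
          if_neg hno, List.nil_append]
      rw [hpairs]
      rw [if_neg (by simpa using hcond)]
      exact ih c (i + 1)

lemma pairsB_eq (w : List Char) :
    ((PySem.List.enumerate (w.zip w.tail) 1).filter
        (fun q => decide (q.2.2 ≠ '-' ∧ q.2.1 = q.2.2))).map (fun q => (q.2.2, q.1))
      = pvPairs none 0 w := by
  cases w with
  | nil => simp [pvPairs, PySem.List.enumerate]
  | cons p t =>
    have h0 : (1 : Int) = 0 + 1 := by ring
    have := enumzip_eq t p 0
    simp only [List.tail_cons]
    rw [h0, this]
    have : ¬ ((none : Option Char) = some p ∧ p ≠ '-') := by simp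
    simp [pvPairs, this]

lemma cntB_getD (m : List (Char × Int)) : ∀ (dct : PySem.Dict Char (Int × Int)) (d : Char),
    (m.foldl (fun d r => d.insert r.1 ((d.getD r.1 (0, 0)).1 + 1, r.2)) dct).getD d (0, 0)
      = ((dct.getD d (0, 0)).1 + ((m.filter (fun r => decide (r.1 = d))).length : Int),
         (m.filter (fun r => decide (r.1 = d))).foldl (fun (_ : Int) r => r.2) ((dct.getD d (0, 0)).2)) := by
  induction m with
  | nil => intro dct d; simp
  | cons r t ih =>
    intro dct d
    simp only [List.foldl_cons]
    rw [ih]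
    by_cases hd : r.1 = d
    · have h1 : (dct.insert r.1 ((dct.getD r.1 (0, 0)).1 + 1, r.2)).getD d (0, 0)
          = ((dct.getD d (0, 0)).1 + 1, r.2) := by
        rw [PySem.Dict.getD_insert]
        simp [hd]
      rw [h1]
      rw [show (r :: t).filter (fun r => decide (r.1 = d)) = r :: t.filter (fun r => decide (r.1 = d)) by
        rw [List.filter_cons]; simp [hd]]
      simp only [List.length_cons, List.foldl_cons, Prod.mk.injEq]
      exact ⟨by push_cast; ring, by trivial⟩
    · have h1 : (dct.insert r.1 ((dct.getD r.1 (0, 0)).1 + 1, r.2)).getD d (0, 0)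
          = dct.getD d (0, 0) := by
        rw [PySem.Dict.getD_insert, if_neg (show ¬ d = r.1 from fun h => hd h.symm)]
      rw [h1]
      rw [show (r :: t).filter (fun r => decide (r.1 = d)) = t.filter (fun r => decide (r.1 = d)) by
        rw [List.filter_cons]; simp [hd]]

-- the second pass returns: after splitting the repeated pair the collapse has length 6
lemma goA_second (u v : List Char) (c : Char) (hc : c ≠ '-')
    (h5 : (pvCol none (u ++ c :: c :: v)).length = 5) (fuel : Nat) :
    pvGoA (fuel + 1) (u ++ c :: '-' :: c :: v) = pvCol none (u ++ c :: '-' :: c :: v) := by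
  have h6 : (pvCol none (u ++ c :: '-' :: c :: v)).length = 6 := by
    rw [insert_len c hc u v none, h5]
  simp only [pvGoA, colA_eq]
  rw [if_neg (by omega)]

lemma goB_second (u v : List Char) (c : Char) (hc : c ≠ '-')
    (h5 : (pvCol none (u ++ c :: c :: v)).length = 5) (fuel : Nat) :
    pvGoB (fuel + 1) (u ++ c :: '-' :: c :: v) = pvCol none (u ++ c :: '-' :: c :: v) := by
  have h6 : (pvCol none (u ++ c :: '-' :: c :: v)).length = 6 := by
    rw [insert_len c hc u v none, h5]
  simp only [pvGoB, colB_eq, List.nil_append]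
  rw [if_pos (by omega)]

lemma main_eq (w : List Char)
    (hpre : (pvCol none w).length = 5 →
      ∃ c ∈ w, 0 < pvRep c w ∧ ∀ d ∈ w, d ≠ c → pvRep d w < pvRep c w) :
    pvGoA (w.length + 1) w = pvGoB (w.length + 1) w := by
  by_cases h5 : (pvCol none w).length = 5
  case neg =>
    have hA : pvGoA (w.length + 1) w = pvCol none w := by
      simp only [pvGoA, colA_eq]; rw [if_neg h5]
    have hB : pvGoB (w.length + 1) w = pvCol none w := by
      simp only [pvGoB, colB_eq, List.nil_append]
      rw [if_pos h5]
    rw [hA, hB]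
  case pos =>
  obtain ⟨c, hcw, hcpos, hcmax⟩ := hpre h5
  -- w is nonempty
  obtain ⟨k, hk⟩ : ∃ k, w.length = k + 1 := by
    cases w with
    | nil => simp [pvCol] at h5
    | cons a t => exact ⟨t.length, by simp⟩
  -- the filtered pair list of the winning letter
  set fl := (pvPairs none 0 w).filter (fun q => decide (q.1 = c)) with hfl
  have hflne : fl ≠ [] := by
    intro h
    have : pvRep c w = 0 := by rw [pvRep, ← hfl, h]; rfl
    omega
  obtain ⟨q, hqfl, hfold1, hfold2⟩ := foldLastPair fl hflne none 0
  have hq1 : q.1 = c := by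
    have := List.of_mem_filter hqfl
    simpa using this
  have hqpairs : (c, q.2) ∈ pvPairs none 0 w := by
    have := List.mem_of_mem_filter hqfl
    rwa [← hq1, Prod.mk.eta]
  obtain ⟨-, u, v, hw, hj⟩ := pairs_decomp w c q.2 hqpairs
  have hc : c ≠ '-' := (pairs_decomp w c q.2 hqpairs).1
  -- the inserted word
  have htake : PySem.List.slice w (some 0) (some q.2) = u ++ [c] := by
    rw [show (some (0 : Int)) = some ((0 : Nat) : Int) by norm_num,
        show q.2 = ((u.length + 1 : Nat) : Int) by push_cast; omega]
    rw [PySem.List.slice_natCast]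
    simp only [List.drop_zero, Nat.sub_zero]
    rw [hw, show u ++ c :: c :: v = (u ++ [c]) ++ c :: v by simp,
        show u.length + 1 = (u ++ [c]).length by simp]
    exact List.take_left
  have hdrop : PySem.List.slice w (some q.2) none = c :: v := by
    rw [show q.2 = ((u.length + 1 : Nat) : Int) by push_cast; omega]
    rw [PySem.List.slice_from_natCast]
    rw [hw, show u ++ c :: c :: v = (u ++ [c]) ++ c :: v by simp,
        show u.length + 1 = (u ++ [c]).length by simp]
    exact List.drop_left
  have hword' : PySem.List.slice w (some 0) (some q.2) ++ '-' :: PySem.List.slice w (some q.2) none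
      = u ++ c :: '-' :: c :: v := by
    rw [htake, hdrop]; simp
  -- ===== A side =====
  have hA : pvGoA (w.length + 1) w = pvCol none (u ++ c :: '-' :: c :: v) := by
    simp only [pvGoA, colA_eq]
    rw [if_pos h5]
    set freqs0 : PySem.Dict Char (Int × Option Int) :=
      (PySem.Set.ofList w).foldl (fun d c => d.insert c ((0 : Int), (none : Option Int))) PySem.Dict.empty with hfreqs0
    set freqs := (w.foldl pvStepA (freqs0, none, 0)).1 with hfreqs
    have hfreqs0_getD : ∀ x, freqs0.getD x ((0 : Int), (none : Option Int)) = (0, none) := by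
      intro x
      exact freq0_getD _ PySem.Dict.empty (fun y => PySem.Dict.getD_empty y _) x
    have hgetD : ∀ d, freqs.getD d (0, none)
        = (((pvRep d w : Nat) : Int),
           ((pvPairs none 0 w).filter (fun q => decide (q.1 = d))).foldl (fun _ q => some q.2) none) := by
      intro d
      rw [hfreqs, freqA_getD w freqs0 none 0 d, hfreqs0_getD d]
      simp [pvRep]
    have hkeys0 : freqs0.keys = PySem.Set.ofList w := by
      rw [hfreqs0, PySem.Dict.keys_foldl_insert, PySem.Dict.keys_empty,
          PySem.Set.update_nil_left, PySem.Set.ofList_ofList]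
    have hkeys : freqs.keys = PySem.Set.ofList w := by
      rw [hfreqs, keys_preserved w freqs0 none 0
        (fun x hx => by rw [hkeys0]; exact (PySem.Set.mem_ofList w x).mpr hx)]
      exact hkeys0
    have hmax : freqs.keys.foldl
        (fun (acc : Int × Option Char) c =>
          if (freqs.getD c (0, none)).1 > acc.1 then ((freqs.getD c (0, none)).1, some c) else acc)
        (0, none) = ((freqs.getD c (0, none)).1, some c) := by
      apply maxScan (fun d => (freqs.getD d (0, none)).1) freqs.keys c (0, none)
      · rw [hkeys]; exact PySem.Set.nodup_ofList w
      · rw [hkeys]; exact (PySem.Set.mem_ofList w c).mpr hcw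
      · show (0 : Int) < (freqs.getD c (0, none)).1
        rw [hgetD c]; dsimp only; exact_mod_cast hcpos
      · intro d hd hdc
        have hdw : d ∈ w := (PySem.Set.mem_ofList w d).mp (hkeys ▸ hd)
        show (freqs.getD d (0, none)).1 < (freqs.getD c (0, none)).1
        rw [hgetD d, hgetD c]; dsimp only
        exact_mod_cast hcmax d hdw hdc
    rw [hmax]
    dsimp only
    have hidx : (freqs.getD c (0, none)).2 = some q.2 := by
      rw [hgetD c]
      exact hfold1
    rw [hidx]
    dsimp only
    rw [hword', hk]
    exact goA_second u v c hc (hw ▸ h5) k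
  -- ===== B side =====
  have hB : pvGoB (w.length + 1) w = pvCol none (u ++ c :: '-' :: c :: v) := by
    simp only [pvGoB, colB_eq, List.nil_append]
    rw [if_neg (by omega)]
    rw [PySem.List.slice_from_one]
    set counts : PySem.Dict Char (Int × Int) :=
      (PySem.List.enumerate (w.zip w.tail) 1).foldl
        (fun d q => if q.2.2 ≠ '-' ∧ q.2.1 = q.2.2
                    then d.insert q.2.2 ((d.getD q.2.2 (0, 0)).1 + 1, q.1) else d)
        PySem.Dict.empty with hcounts
    have hstep : ∀ (L : List (Int × Char × Char)) (d0 : PySem.Dict Char (Int × Int)),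
        L.foldl (fun d q => if q.2.2 ≠ '-' ∧ q.2.1 = q.2.2
                  then d.insert q.2.2 ((d.getD q.2.2 (0, 0)).1 + 1, q.1) else d) d0
          = ((L.filter (fun q => decide (q.2.2 ≠ '-' ∧ q.2.1 = q.2.2))).map
              (fun q => (q.2.2, q.1))).foldl
              (fun d r => d.insert r.1 ((d.getD r.1 (0, 0)).1 + 1, r.2)) d0 := by
      intro L
      induction L with
      | nil => intro d0; rfl
      | cons x L ihL =>
        intro d0
        rw [List.foldl_cons, List.filter_cons]
        by_cases hx : x.2.2 ≠ '-' ∧ x.2.1 = x.2.2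
        · rw [if_pos hx, if_pos (by simpa using hx), List.map_cons, List.foldl_cons]
          exact ihL _
        · rw [if_neg hx, if_neg (by simpa using hx)]
          exact ihL d0
    have hcounts_eq : counts = (pvPairs none 0 w).foldl
        (fun d r => d.insert r.1 ((d.getD r.1 (0, 0)).1 + 1, r.2)) PySem.Dict.empty := by
      rw [hcounts, hstep, pairsB_eq]
    have hgetDB : ∀ d, counts.getD d (0, 0)
        = (((pvRep d w : Nat) : Int),
           ((pvPairs none 0 w).filter (fun r => decide (r.1 = d))).foldl (fun (_ : Int) r => r.2) 0) := by
      intro d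
      rw [hcounts_eq, cntB_getD (pvPairs none 0 w) PySem.Dict.empty d, PySem.Dict.getD_empty]
      simp [pvRep]
    have hkeysB : counts.keys = PySem.Set.ofList ((pvPairs none 0 w).map Prod.fst) := by
      rw [hcounts_eq, PySem.Dict.keys_foldl_insert_key (pvPairs none 0 w) Prod.fst
        (fun d r => ((d.getD r.1 (0, 0)).1 + 1, r.2)) PySem.Dict.empty]
      rw [PySem.Dict.keys_empty, PySem.Set.update_nil_left]
    have hndB : counts.keys.Nodup := by
      rw [hkeysB]; exact PySem.Set.nodup_ofList _
    have hitems : counts.items = counts.keys.map (fun k => (k, counts.getD k (0, 0))) :=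
      PySem.Dict.items_eq_map_keys counts hndB (0, 0)
    have hbr : counts.items.foldl
        (fun (acc : Option Char × Int × Int) q => if q.2.1 > acc.2.1 then (some q.1, q.2) else acc)
        (none, 0, 0) = (some c, counts.getD c (0, 0)) := by
      rw [hitems, List.foldl_map]
      apply maxScanB (fun k => counts.getD k (0, 0)) counts.keys c (none, 0, 0) hndB
      · rw [hkeysB]
        apply (PySem.Set.mem_ofList _ c).mpr
        exact List.mem_map.mpr ⟨(c, q.2), hqpairs, rfl⟩
      · show (0 : Int) < (counts.getD c (0, 0)).1
        rw [hgetDB c]; dsimp only; exact_mod_cast hcpos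
      · intro d hd hdc
        have hdw : d ∈ w := by
          rw [hkeysB] at hd
          obtain ⟨r, hr, hr1⟩ := List.mem_map.mp ((PySem.Set.mem_ofList _ d).mp hd)
          exact hr1 ▸ pairs_fst_mem w r.1 r.2 (by rwa [Prod.mk.eta])
        show (counts.getD d (0, 0)).1 < (counts.getD c (0, 0)).1
        rw [hgetDB d, hgetDB c]; dsimp only
        exact_mod_cast hcmax d hdw hdc
    rw [hbr]
    dsimp only
    have hidxB : (counts.getD c (0, 0)).2 = q.2 := by
      rw [hgetDB c]
      exact hfold2
    rw [hidxB, hword', hk]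
    exact goB_second u v c hc (hw ▸ h5) k
  rw [hA, hB]

-- ===== VERDICT (by name: the statement is the Claim_ definition above) =====
theorem correct_prediction_spec : Claim_equal_correct_prediction := by
  intro word _ hpre
  show correct_prediction word = correct_prediction_alt word
  unfold correct_prediction correct_prediction_alt
  exact congrArg String.ofList (main_eq word.toList hpre)

set_option maxRecDepth 8192 in
theorem correct_prediction_raises : Claim_raises_correct_prediction := by
  unfold Claim_raises_correct_prediction
  have htl : "abcde".toList = ['a', 'b', 'c', 'd', 'e'] := by simp
  constructor
  · intro word _ hr hpre
    obtain ⟨c, hcw, hcpos, -⟩ := hpre hr.1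
    have hz : pvRep c word.toList = 0 := by simp [pvRep, hr.2]
    omega
  · refine ⟨?_, ?_, ?_⟩
    · show pvDomStr "abcde" = true
      unfold pvDomStr; rw [htl]; decide
    · show (pvCol none "abcde".toList).length = 5 ∧ pvPairs none 0 "abcde".toList = []
      rw [htl]; exact ⟨by decide, by decide⟩
    · show correct_prediction_alt "abcde" = "abcde"
      unfold correct_prediction_alt; rw [htl]; decide

-- self-check: the crash witness indeed lies inside the Raises_ region (a projection of the claim)
theorem correct_prediction_raises_ok :
    Raises_correct_prediction pvRaiseWitness_correct_prediction := correct_prediction_raises.2.2.1
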